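-- pv_equiv track=rewrite | github.com/samiksha014/Python_Lab | vowel.py | get_valid_vowel
-- ===== SOURCE A (Python) =====
-- def get_valid_vowel(string):
--     vowels = "aeiou"
--     vowel_counts = { 'a': 0, 'e': 0, 'i': 0, 'o': 0, 'u': 0 }
--
--     for char in string:
--         if char in vowels:
--             vowel_counts[char] += 1
--
--     unique_vowel_counts = []
--     for count in vowel_counts.values():
--         if count > 0:
--             unique_vowel_counts.append(count)
--
--     return len(set(unique_vowel_counts)) == 1, len(unique_vowel_counts)
-- ===== SOURCE B (Python) =====
-- def get_valid_vowel(string):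
--     # Sort-then-scan: extract the vowels, sort them, and walk the sorted list
--     # once collecting run lengths; the runs are the per-vowel counts in order.
--     vs = sorted(c for c in string if c in "aeiou")
--     runs = []
--     n = 0
--     prev = None
--     for c in vs:
--         if c == prev:
--             n += 1
--         else:
--             if n > 0:
--                 runs.append(n)
--             n = 1
--             prev = c
--     if n > 0:
--         runs.append(n)
--     return len(runs) > 0 and min(runs) == max(runs), len(runs)
-- ===== Notes on version B (the rewrite author's own statement) =====
-- stated objective: alternative
-- what changed: Replaces the dict-counting pass plus set-size test by a sort-then-scan algorithm: extract the vowels, sort them, walk the sorted list once collecting run lengths, and compare min and max run length; no counter structure exists.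
import Mathlib
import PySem

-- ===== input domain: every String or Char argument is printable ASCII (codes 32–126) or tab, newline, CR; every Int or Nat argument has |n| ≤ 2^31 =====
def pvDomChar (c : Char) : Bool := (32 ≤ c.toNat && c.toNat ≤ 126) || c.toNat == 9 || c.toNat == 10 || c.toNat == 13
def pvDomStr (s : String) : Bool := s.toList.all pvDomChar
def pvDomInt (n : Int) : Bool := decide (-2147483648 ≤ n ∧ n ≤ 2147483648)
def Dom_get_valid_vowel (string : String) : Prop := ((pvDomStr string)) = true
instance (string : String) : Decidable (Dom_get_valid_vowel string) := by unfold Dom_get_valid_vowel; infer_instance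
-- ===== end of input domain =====

-- B replaces A's dict-counting plus set-size test with a sort-then-scan algorithm
-- (sort the extracted vowels, collect run lengths, compare min and max run length).

-- ===== PORT A =====
-- literal transliteration: dict of five zeroed counters, one pass incrementing,
-- then a second loop collecting the positive values, then the set/length test
def get_valid_vowel (string : String) : Bool × Int :=
  let vowels : List Char := "aeiou".toList
  let vowel_counts : PySem.Dict Char Int :=
    PySem.Dict.ofList [('a', 0), ('e', 0), ('i', 0), ('o', 0), ('u', 0)]
  let vowel_counts :=
    string.toList.foldl
      (fun d char => if vowels.contains char then d.modify char 0 (· + 1) else d)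
      vowel_counts
  let unique_vowel_counts :=
    vowel_counts.values.foldl
      (fun acc count => if count > 0 then acc ++ [count] else acc) []
  (((PySem.Set.ofList unique_vowel_counts).length == 1), (unique_vowel_counts.length : Int))

-- ===== PORT B =====
-- the loop body of Source B: state (runs, n, prev)
def pvStepB (st : List Int × Int × Option Char) (c : Char) : List Int × Int × Option Char :=
  match st with
  | (runs, n, prev) =>
    if some c == prev then (runs, n + 1, prev)
    else ((if n > 0 then runs ++ [n] else runs), 1, some c)

-- sorted vowels, one scan collecting run lengths, then min/max comparison
def get_valid_vowel_alt (string : String) : Bool × Int :=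
  let vs := PySem.List.sorted (string.toList.filter (fun c => ("aeiou".toList).contains c)) (fun x => x) false
  let st := vs.foldl pvStepB ([], 0, none)
  let runs := if st.2.1 > 0 then st.1 ++ [st.2.1] else st.1
  ((decide (runs.length > 0) && (PySem.List.min? runs (fun x => x) == PySem.List.max? runs (fun x => x))),
   (runs.length : Int))

-- ===== PRECONDITION & SPEC =====
def Spec_get_valid_vowel (string : String) (out : Bool × Int) : Prop := out = get_valid_vowel_alt string
instance (string : String) (out : Bool × Int) : Decidable (Spec_get_valid_vowel string out) := by unfold Spec_get_valid_vowel; infer_instance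

-- ===== CLAIM (what is proved, stated in full; the proofs are below) =====
def Claim_equal_get_valid_vowel : Prop := ∀ (string : String), Dom_get_valid_vowel string → Spec_get_valid_vowel string (get_valid_vowel string)

-- ===== LEMMAS AND PROOFS =====

-- A's counting loop, fully characterised: starting from the five-key dict it
-- produces exactly the five per-vowel counts in place.
theorem pv_fold_counts (l : List Char) (a e i o u : Int) :
    l.foldl
      (fun d char => if ("aeiou".toList).contains char then PySem.Dict.modify d char 0 (· + 1) else d)
      (PySem.Dict.ofList [('a', a), ('e', e), ('i', i), ('o', o), ('u', u)])
    = PySem.Dict.ofList [('a', a + l.count 'a'), ('e', e + l.count 'e'),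
        ('i', i + l.count 'i'), ('o', o + l.count 'o'), ('u', u + l.count 'u')] := by
  induction l generalizing a e i o u with
  | nil => simp
  | cons c l ih =>
    by_cases ha : c = 'a'
    · subst ha
      simp only [List.foldl_cons, List.count_cons]
      rw [show (("aeiou".toList).contains 'a') = true by decide]
      simp only [if_true]
      rw [show PySem.Dict.modify (PySem.Dict.ofList [('a', a), ('e', e), ('i', i), ('o', o), ('u', u)]) 'a' 0 (· + 1)
            = PySem.Dict.ofList [('a', a + 1), ('e', e), ('i', i), ('o', o), ('u', u)] from rfl]
      rw [ih]; congr 1; simp; ring_nf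
    · by_cases he : c = 'e'
      · subst he
        simp only [List.foldl_cons, List.count_cons]
        rw [show (("aeiou".toList).contains 'e') = true by decide]
        simp only [if_true]
        rw [show PySem.Dict.modify (PySem.Dict.ofList [('a', a), ('e', e), ('i', i), ('o', o), ('u', u)]) 'e' 0 (· + 1)
              = PySem.Dict.ofList [('a', a), ('e', e + 1), ('i', i), ('o', o), ('u', u)] from rfl]
        rw [ih]; congr 1; simp; ring_nf
      · by_cases hi : c = 'i'
        · subst hi
          simp only [List.foldl_cons, List.count_cons]
          rw [show (("aeiou".toList).contains 'i') = true by decide]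
          simp only [if_true]
          rw [show PySem.Dict.modify (PySem.Dict.ofList [('a', a), ('e', e), ('i', i), ('o', o), ('u', u)]) 'i' 0 (· + 1)
                = PySem.Dict.ofList [('a', a), ('e', e), ('i', i + 1), ('o', o), ('u', u)] from rfl]
          rw [ih]; congr 1; simp; ring_nf
        · by_cases ho : c = 'o'
          · subst ho
            simp only [List.foldl_cons, List.count_cons]
            rw [show (("aeiou".toList).contains 'o') = true by decide]
            simp only [if_true]
            rw [show PySem.Dict.modify (PySem.Dict.ofList [('a', a), ('e', e), ('i', i), ('o', o), ('u', u)]) 'o' 0 (· + 1)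
                  = PySem.Dict.ofList [('a', a), ('e', e), ('i', i), ('o', o + 1), ('u', u)] from rfl]
            rw [ih]; congr 1; simp; ring_nf
          · by_cases hu : c = 'u'
            · subst hu
              simp only [List.foldl_cons, List.count_cons]
              rw [show (("aeiou".toList).contains 'u') = true by decide]
              simp only [if_true]
              rw [show PySem.Dict.modify (PySem.Dict.ofList [('a', a), ('e', e), ('i', i), ('o', o), ('u', u)]) 'u' 0 (· + 1)
                    = PySem.Dict.ofList [('a', a), ('e', e), ('i', i), ('o', o), ('u', u + 1)] from rfl]
              rw [ih]; congr 1; simp; ring_nf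
            · have hcon : ("aeiou".toList).contains c = false := by
                apply Bool.eq_false_iff.mpr
                intro h
                have hm : c ∈ ("aeiou".toList) := by
                  exact List.mem_of_elem_eq_true h
                rcases (by simpa using hm : c = 'a' ∨ c = 'e' ∨ c = 'i' ∨ c = 'o' ∨ c = 'u') with
                  h | h | h | h | h <;> simp_all
              simp only [List.foldl_cons, hcon, Bool.false_eq_true, if_false, List.count_cons]
              rw [ih]
              congr 1
              simp [ha, he, hi, ho, hu]

-- A's collect-positives loop is a filter
theorem pv_fold_filter (l : List Int) (acc : List Int) :
    l.foldl (fun acc count => if count > 0 then acc ++ [count] else acc) acc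
    = acc ++ l.filter (fun c => c > 0) := by
  induction l generalizing acc with
  | nil => simp
  | cons x l ih =>
    by_cases hx : x > 0 <;> simp [hx, ih]

-- the final flush of Source B ("if n > 0: runs.append(n)")
def pvFlush (st : List Int × Int × Option Char) : List Int :=
  if st.2.1 > 0 then st.1 ++ [st.2.1] else st.1

-- the sorted vowel list is the concatenation of the five replicate blocks
theorem pv_sorted_canon (l : List Char) :
    PySem.List.sorted (l.filter (fun c => ("aeiou".toList).contains c)) (fun x => x) false
    = List.replicate (l.count 'a') 'a' ++ List.replicate (l.count 'e') 'e'
      ++ List.replicate (l.count 'i') 'i' ++ List.replicate (l.count 'o') 'o'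
      ++ List.replicate (l.count 'u') 'u' := by
  apply PySem.List.sorted_id_eq_of_perm_of_pairwise
  · rw [List.perm_iff_count]
    intro a
    simp only [List.count_append, List.count_replicate]
    by_cases ha : a = 'a'
    · subst ha; rw [List.count_filter (by decide)]; simp
    · by_cases he : a = 'e'
      · subst he; rw [List.count_filter (by decide)]; simp
      · by_cases hi : a = 'i'
        · subst hi; rw [List.count_filter (by decide)]; simp
        · by_cases ho : a = 'o'
          · subst ho; rw [List.count_filter (by decide)]; simp
          · by_cases hu : a = 'u'
            · subst hu; rw [List.count_filter (by decide)]; simp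
            · have h0 : List.count a (l.filter (fun c => ("aeiou".toList).contains c)) = 0 := by
                rw [List.count_eq_zero]
                intro hmem
                have hp := List.of_mem_filter hmem
                have hm : a ∈ ("aeiou".toList) := List.mem_of_elem_eq_true hp
                rcases (by simpa using hm : a = 'a' ∨ a = 'e' ∨ a = 'i' ∨ a = 'o' ∨ a = 'u') with
                  h | h | h | h | h <;> simp_all
              rw [h0, if_neg (fun h => ha (beq_iff_eq.mp h).symm), if_neg (fun h => he (beq_iff_eq.mp h).symm),
                if_neg (fun h => hi (beq_iff_eq.mp h).symm), if_neg (fun h => ho (beq_iff_eq.mp h).symm),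
                if_neg (fun h => hu (beq_iff_eq.mp h).symm)]
  · simp only [List.pairwise_append, List.pairwise_replicate, List.mem_append,
      List.mem_replicate]
    refine ⟨⟨⟨⟨Or.inr le_rfl, Or.inr le_rfl, ?_⟩, Or.inr le_rfl, ?_⟩, Or.inr le_rfl, ?_⟩,
      Or.inr le_rfl, ?_⟩
    · rintro a ⟨-, rfl⟩ b ⟨-, rfl⟩; decide
    · rintro a (⟨-, rfl⟩ | ⟨-, rfl⟩) b ⟨-, rfl⟩ <;> decide
    · rintro a ((⟨-, rfl⟩ | ⟨-, rfl⟩) | ⟨-, rfl⟩) b ⟨-, rfl⟩ <;> decide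
    · rintro a (((⟨-, rfl⟩ | ⟨-, rfl⟩) | ⟨-, rfl⟩) | ⟨-, rfl⟩) b ⟨-, rfl⟩ <;> decide

-- staying inside one run only increments n
theorem pv_step_run (j : Nat) (runs : List Int) (n : Int) (c : Char) :
    (List.replicate j c).foldl pvStepB (runs, n, some c) = (runs, n + j, some c) := by
  induction j generalizing n with
  | zero => simp
  | succ j ih =>
    simp only [List.replicate_succ, List.foldl_cons]
    rw [show pvStepB (runs, n, some c) c = (runs, n + 1, some c) by simp [pvStepB]]
    rw [ih]
    congr 2
    push_cast; ring

theorem pv_chain (L : List (Nat × Char)) (runs : List Int) (n : Int) (prev : Option Char)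
    (hp : ∀ p ∈ L, prev ≠ some p.2) (hnd : (L.map Prod.snd).Nodup) :
    pvFlush ((L.flatMap (fun p => List.replicate p.1 p.2)).foldl pvStepB (runs, n, prev))
    = pvFlush (runs, n, prev) ++ (L.filter (fun p => p.1 > 0)).map (fun p => ((p.1 : Int))) := by
  induction L generalizing runs n prev with
  | nil => simp
  | cons q L ih =>
    obtain ⟨k, c⟩ := q
    simp only [List.flatMap_cons, List.foldl_append]
    rcases Nat.eq_zero_or_pos k with hk | hk
    · subst hk
      simp only [List.replicate_zero, List.foldl_nil, List.filter_cons]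
      rw [List.map_cons, List.nodup_cons] at hnd
      rw [ih runs n prev (fun p hpL => hp p (List.mem_cons_of_mem _ hpL)) hnd.2]
      norm_num
    · obtain ⟨j, rfl⟩ : ∃ j, k = j + 1 := ⟨k - 1, by omega⟩
      have hne : (some c == prev) = false := by
        have := hp (j + 1, c) (List.mem_cons_self)
        cases prev with
        | none => rfl
        | some p =>
          simp only [beq_eq_false_iff_ne]
          exact fun h => this h.symm
      simp only [List.replicate_succ, List.foldl_cons]
      rw [show pvStepB (runs, n, prev) c = ((if n > 0 then runs ++ [n] else runs), 1, some c) by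
        simp [pvStepB, hne]]
      rw [pv_step_run]
      rw [List.map_cons, List.nodup_cons] at hnd
      have hndc := hnd
      have hc : ∀ p ∈ L, (some c : Option Char) ≠ some p.2 := by
        intro p hpL h
        exact hndc.1 (by simp only [List.mem_map]; exact ⟨p, hpL, (Option.some_injective _ h).symm⟩)
      rw [ih _ _ _ hc hndc.2]
      have h1 : pvFlush ((if n > 0 then runs ++ [n] else runs), 1 + (j : Int), some c)
          = pvFlush (runs, n, prev) ++ [1 + (j : Int)] := by
        have hpos : 1 + (j : Int) > 0 := by positivity
        simp only [pvFlush, if_pos hpos]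
      rw [h1]
      rw [show (List.filter (fun p => decide (p.1 > 0)) ((j + 1, c) :: L))
          = (j + 1, c) :: List.filter (fun p => decide (p.1 > 0)) L by simp]
      simp only [List.map_cons, List.append_assoc, List.cons_append, List.nil_append]
      congr 2
      push_cast; ring

-- pushing the Int cast through the positive filter
theorem pv_filter_map (L : List (Nat × Char)) :
    (L.filter (fun p => decide (p.1 > 0))).map (fun p => ((p.1 : Int)))
    = (L.map (fun p => ((p.1 : Int)))).filter (fun c => decide (c > 0)) := by
  induction L with
  | nil => rfl
  | cons q L ih =>
    by_cases hq : q.1 > 0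
    · simp [hq, ih]
    · simp [hq, ih]

-- a nonempty nodup list of equal elements is a singleton
theorem pv_nodup_all_eq {l : List Int} {x : Int} (hx : x ∈ l) (hnd : l.Nodup)
    (hall : ∀ y ∈ l, y = x) : l = [x] := by
  cases l with
  | nil => cases hx
  | cons a t =>
    have ha : a = x := hall a (List.mem_cons_self)
    subst ha
    cases t with
    | nil => rfl
    | cons b t =>
      have hb : b = a := hall b (by simp)
      exact absurd (hb ▸ List.mem_cons_self) (List.nodup_cons.mp hnd).1

-- "set of the list has one element" = "nonempty and min equals max"
theorem pv_final (fl : List Int) :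
    ((PySem.Set.ofList fl).length == 1)
    = (decide (fl.length > 0)
       && (PySem.List.min? fl (fun x => x) == PySem.List.max? fl (fun x => x))) := by
  cases fl with
  | nil => decide
  | cons x t =>
    simp only [List.length_cons, Nat.zero_lt_succ, decide_true, Bool.true_and]
    rcases hm : PySem.List.min? (x :: t) (fun y => y) with _ | m
    · exact absurd ((PySem.List.min?_eq_none_iff _ _).mp hm) (by simp)
    rcases hM : PySem.List.max? (x :: t) (fun y => y) with _ | M
    · exact absurd ((PySem.List.max?_eq_none_iff _ _).mp hM) (by simp)
    have hmmem := PySem.List.min?_mem hm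
    have hMmem := PySem.List.max?_mem hM
    have hmle := PySem.List.min?_isMin hm
    have hMge := PySem.List.max?_isMax hM
    apply Bool.eq_iff_iff.mpr
    simp only [beq_iff_eq, Option.some_inj]
    constructor
    · intro h1
      obtain ⟨z, hz⟩ : ∃ z, PySem.Set.ofList (x :: t) = [z] := by
        rcases hs : PySem.Set.ofList (x :: t) with _ | ⟨z, s⟩
        · simp [hs] at h1
        · rcases s with _ | ⟨w, s⟩
          · exact ⟨z, rfl⟩
          · simp [hs] at h1
      have hall : ∀ y ∈ (x :: t), y = z := by
        intro y hy
        have : y ∈ PySem.Set.ofList (x :: t) := (PySem.Set.mem_ofList _ _).mpr hy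
        rw [hz] at this; simpa using this
      rw [hall m hmmem, hall M hMmem]
    · intro h1
      have hall : ∀ y ∈ (x :: t), y = m := by
        intro y hy
        have h2 := hmle y hy
        have h3 := hMge y hy
        rw [← h1] at h3
        omega
      have : PySem.Set.ofList (x :: t) = [m] :=
        pv_nodup_all_eq ((PySem.Set.mem_ofList _ _).mpr hmmem) (PySem.Set.nodup_ofList _)
          (fun y hy => hall y ((PySem.Set.mem_ofList _ _).mp hy))
      rw [this]
      rfl

-- ===== VERDICT (by name: the statement is the Claim_ definition above) =====
-- Dict.values of the five-key literal dict
theorem pv_values (a e i o u : Int) :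
    (PySem.Dict.ofList [('a', a), ('e', e), ('i', i), ('o', o), ('u', u)]).values
    = [a, e, i, o, u] := rfl

theorem get_valid_vowel_spec : Claim_equal_get_valid_vowel := by
  intro s _
  unfold Spec_get_valid_vowel get_valid_vowel get_valid_vowel_alt
  simp only [pv_fold_counts, pv_fold_filter, pv_sorted_canon, pv_values, List.nil_append,
    zero_add]
  have hcanon :
      List.replicate (s.toList.count 'a') 'a' ++ List.replicate (s.toList.count 'e') 'e'
        ++ List.replicate (s.toList.count 'i') 'i' ++ List.replicate (s.toList.count 'o') 'o'
        ++ List.replicate (s.toList.count 'u') 'u'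
      = ([(s.toList.count 'a', 'a'), (s.toList.count 'e', 'e'), (s.toList.count 'i', 'i'),
          (s.toList.count 'o', 'o'), (s.toList.count 'u', 'u')].flatMap
          (fun p => List.replicate p.1 p.2)) := by
    simp [List.flatMap]
  rw [hcanon]
  have hch := pv_chain
    [(s.toList.count 'a', 'a'), (s.toList.count 'e', 'e'), (s.toList.count 'i', 'i'),
     (s.toList.count 'o', 'o'), (s.toList.count 'u', 'u')] [] 0 none
    (by intro p _ h; cases h) (by simp)
  have hfl : ∀ st : List Int × Int × Option Char,
      (if st.2.1 > 0 then st.1 ++ [st.2.1] else st.1) = pvFlush st := fun _ => rfl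
  rw [hfl, hch, pv_filter_map]
  simp only [pvFlush, List.map_cons, List.map_nil]
  norm_num only
  rw [pv_final]
  simp
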